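-- pv_equiv track=rewrite | github.com/bixon85/hack_aissms | src/generator.py | _connect_grid_lines
-- ===== SOURCE A (Python) =====
-- from typing import Dict, List, Tuple
--
-- def _connect_grid_lines(dots: List[Tuple[int, int]]) -> List[Dict]:
-- 	if not dots:
-- 		return []
-- 	sorted_d = sorted(dots, key=lambda p: (p[1], p[0]))
-- 	rows = []
-- 	row = [sorted_d[0]]
-- 	for i in range(1, len(sorted_d)):
-- 		if abs(sorted_d[i][1] - row[-1][1]) <= 10:
-- 			row.append(sorted_d[i])
-- 		else:
-- 			rows.append(row)
-- 			row = [sorted_d[i]]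
-- 	rows.append(row)
-- 	strokes = []
-- 	for r in rows:
-- 		if len(r) >= 2:
-- 			strokes.append({"points": r})
-- 	return strokes
-- ===== SOURCE B (Python) =====
-- def _connect_grid_lines(dots):
--     strokes = []
--     rest = sorted(dots, key=lambda p: (p[1], p[0]))
--     while rest:
--         # start a new run, then extend it maximally with an inner scan
--         prev = rest[0]
--         run = [prev]
--         rest = rest[1:]
--         while rest and abs(rest[0][1] - prev[1]) <= 10:
--             prev = rest[0]
--             run.append(prev)
--             rest = rest[1:]
--         if len(run) >= 2:
--             strokes.append({"points": run})
--     return strokes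
-- ===== Notes on version B (the rewrite author's own statement) =====
-- stated objective: alternative
-- what changed: A makes one pass accumulating a current row (flushing on a y-gap) into a rows list and then filters rows of length >= 2 in a second loop; B extracts each maximal run with a nested scan (outer loop per row, inner loop extending the run) and emits qualifying strokes inline, never building the rows list or consulting row[-1].
import Mathlib
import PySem

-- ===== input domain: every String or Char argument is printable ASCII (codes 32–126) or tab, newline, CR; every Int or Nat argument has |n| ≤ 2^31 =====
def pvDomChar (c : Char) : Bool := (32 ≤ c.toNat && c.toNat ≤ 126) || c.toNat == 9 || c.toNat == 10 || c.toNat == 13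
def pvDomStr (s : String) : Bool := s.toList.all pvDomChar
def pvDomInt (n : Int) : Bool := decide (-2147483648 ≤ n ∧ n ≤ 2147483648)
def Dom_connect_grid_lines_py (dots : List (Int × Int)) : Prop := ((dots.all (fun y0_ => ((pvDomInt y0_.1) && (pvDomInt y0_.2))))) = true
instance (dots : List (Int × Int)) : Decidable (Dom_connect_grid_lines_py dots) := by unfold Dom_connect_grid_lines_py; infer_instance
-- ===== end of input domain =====

-- B groups the sorted dots by extracting maximal runs with a nested scan and emits strokes
-- inline, instead of A's single accumulator pass plus a separate filtering loop (objective: alternative).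

-- ===== PORT A =====
-- the for-loop over range(1, len(sorted_d)) with state (rows, row); row[-1] via pyGetD
-- (row is never empty, so the default (0, 0) is never used)
def pvALoop (ps : List (Int × Int)) (rows : List (List (Int × Int))) (row : List (Int × Int)) :
    List (List (Int × Int)) :=
  match ps with
  | [] => rows ++ [row]
  | p :: rest =>
      if |p.2 - (PySem.List.pyGetD row (-1) (0, 0)).2| ≤ 10 then
        pvALoop rest rows (row ++ [p])
      else
        pvALoop rest (rows ++ [row]) [p]

def connect_grid_lines_py (dots : List (Int × Int)) : List (List (String × List (Int × Int))) :=
  if dots = [] then []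
  else
    let sorted_d := PySem.List.sorted2 dots (fun p => p.2) (fun p => p.1) false
    match sorted_d with
    | [] => []  -- unreachable: sorted of a nonempty list is nonempty
    | x :: rest =>
        let rows := pvALoop rest [] [x]
        -- second loop: for r in rows: if len(r) >= 2: strokes.append({"points": r})
        rows.foldl (fun strokes r => if 2 ≤ r.length then strokes ++ [[("points", r)]] else strokes) []

-- ===== PORT B =====
-- inner while loop: extend the run from prev while the next dot is within 10 in y;
-- returns (elements appended to run, remaining rest)
def pvTakeRun (prev : Int × Int) : List (Int × Int) → List (Int × Int) × List (Int × Int)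
  | [] => ([], [])
  | y :: ys =>
      if |y.2 - prev.2| ≤ 10 then
        let (run, rem) := pvTakeRun y ys
        (y :: run, rem)
      else ([], y :: ys)

theorem pvTakeRun_rem_le (prev : Int × Int) (l : List (Int × Int)) :
    (pvTakeRun prev l).2.length ≤ l.length := by
  induction l generalizing prev with
  | nil => simp [pvTakeRun]
  | cons y ys ih =>
      simp only [pvTakeRun]
      split
      · exact le_trans (ih y) (Nat.le_succ _)
      · simp

-- outer while loop over the remaining sorted suffix
def pvBLoop : List (Int × Int) → List (List (String × List (Int × Int)))
  | [] => []
  | x :: rest =>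
      let t := pvTakeRun x rest
      let row := x :: t.1
      (if 2 ≤ row.length then [[("points", row)]] else []) ++ pvBLoop t.2
termination_by l => l.length
decreasing_by
  simpa using Nat.lt_succ_of_le (pvTakeRun_rem_le x rest)

def connect_grid_lines_py_alt (dots : List (Int × Int)) : List (List (String × List (Int × Int))) :=
  pvBLoop (PySem.List.sorted2 dots (fun p => p.2) (fun p => p.1) false)

-- ===== PRECONDITION & SPEC =====
def Spec_connect_grid_lines_py (dots : List (Int × Int)) (out : List (List (String × List (Int × Int)))) : Prop := out = connect_grid_lines_py_alt dots
instance (dots : List (Int × Int)) (out : List (List (String × List (Int × Int)))) : Decidable (Spec_connect_grid_lines_py dots out) := by unfold Spec_connect_grid_lines_py; infer_instance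

-- ===== CLAIM (what is proved, stated in full; the proofs are below) =====
def Claim_equal_connect_grid_lines_py : Prop := ∀ (dots : List (Int × Int)), Dom_connect_grid_lines_py dots → Spec_connect_grid_lines_py dots (connect_grid_lines_py dots)

-- ===== LEMMAS AND PROOFS =====

-- canonical grouping: partition x :: l with a break between consecutive dots whose y's differ by more than 10
def pvGrp (x : Int × Int) : List (Int × Int) → List (List (Int × Int))
  | [] => [[x]]
  | y :: ys =>
      if |y.2 - x.2| ≤ 10 then
        match pvGrp y ys with
        | [] => [[x]]  -- unreachable
        | g :: gs => (x :: g) :: gs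
      else [x] :: pvGrp y ys

theorem pvGrp_cons (x : Int × Int) (l : List (Int × Int)) :
    ∃ g gs, pvGrp x l = (x :: g) :: gs := by
  induction l generalizing x with
  | nil => exact ⟨[], [], rfl⟩
  | cons y ys ih =>
      simp only [pvGrp]
      split
      · obtain ⟨g, gs, h⟩ := ih y
        rw [h]
        exact ⟨y :: g, gs, rfl⟩
      · exact ⟨[], pvGrp y ys, rfl⟩

def pvStrokes (rows : List (List (Int × Int))) : List (List (String × List (Int × Int))) :=
  rows.foldl (fun strokes r => if 2 ≤ r.length then strokes ++ [[("points", r)]] else strokes) []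

theorem pvStrokes_acc (rows : List (List (Int × Int)))
    (acc : List (List (String × List (Int × Int)))) :
    rows.foldl (fun strokes r => if 2 ≤ r.length then strokes ++ [[("points", r)]] else strokes) acc
      = acc ++ pvStrokes rows := by
  induction rows generalizing acc with
  | nil => simp [pvStrokes]
  | cons r rs ih =>
      simp only [pvStrokes, List.foldl_cons]
      rw [ih, ih ((if 2 ≤ r.length then [] ++ [[("points", r)]] else []))]
      split <;> simp [pvStrokes]

theorem pvStrokes_cons (r : List (Int × Int)) (rs : List (List (Int × Int))) :
    pvStrokes (r :: rs)
      = (if 2 ≤ r.length then [[("points", r)]] else []) ++ pvStrokes rs := by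
  simp only [pvStrokes, List.foldl_cons]
  rw [pvStrokes_acc]
  split <;> simp [pvStrokes]

-- A's loop computes the canonical grouping (row = pre ++ [x]; the comparison only sees x)
theorem pvALoop_grp (ps : List (Int × Int)) (rows : List (List (Int × Int)))
    (pre : List (Int × Int)) (x : Int × Int) :
    pvALoop ps rows (pre ++ [x])
      = rows ++ (match pvGrp x ps with
                 | [] => [pre]
                 | g :: gs => (pre ++ g) :: gs) := by
  induction ps generalizing rows pre x with
  | nil => simp [pvALoop, pvGrp]
  | cons p rest ih =>
      simp only [pvALoop, PySem.List.pyGetD_neg_one_append_singleton]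
      by_cases h : |p.2 - x.2| ≤ 10
      · rw [if_pos h]
        rw [ih rows (pre ++ [x]) p]
        obtain ⟨g, gs, hg⟩ := pvGrp_cons p rest
        simp only [pvGrp, if_pos h, hg]
        simp
      · rw [if_neg h]
        have := ih (rows ++ [pre ++ [x]]) ([] : List (Int × Int)) p
        simp only [List.nil_append] at this
        rw [this]
        obtain ⟨g, gs, hg⟩ := pvGrp_cons p rest
        simp only [pvGrp, if_neg h, hg]
        simp

-- B's run extraction computes the head group of the canonical grouping
theorem pvTakeRun_grp (x : Int × Int) (l : List (Int × Int)) :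
    pvGrp x l = (x :: (pvTakeRun x l).1) :: (match (pvTakeRun x l).2 with
                                             | [] => ([] : List (List (Int × Int)))
                                             | y :: ys => pvGrp y ys) := by
  induction l generalizing x with
  | nil => simp [pvGrp, pvTakeRun]
  | cons y ys ih =>
      have ihy := ih y
      by_cases h : |y.2 - x.2| ≤ 10
      · simp [pvGrp, pvTakeRun, h, ihy]
      · simp [pvGrp, pvTakeRun, h, ihy]

-- B's loop = strokes of the canonical grouping
theorem pvBLoop_eq_strokes : ∀ (l : List (Int × Int)),
    pvBLoop l = pvStrokes (match l with | [] => [] | x :: rest => pvGrp x rest) := by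
  intro l
  generalize hn : l.length = n
  induction n using Nat.strong_induction_on generalizing l with
  | _ n ih =>
    cases l with
    | nil => rw [pvBLoop]; simp [pvStrokes]
    | cons x rest =>
        rw [pvBLoop]
        dsimp only
        rw [pvTakeRun_grp x rest, pvStrokes_cons]
        congr 1
        refine ih (pvTakeRun x rest).2.length ?_ _ rfl
        have := pvTakeRun_rem_le x rest
        simp only [List.length_cons] at hn
        omega

-- ===== VERDICT (by name: the statement is the Claim_ definition above) =====
theorem connect_grid_lines_py_spec : Claim_equal_connect_grid_lines_py := by
  intro dots _
  unfold Spec_connect_grid_lines_py connect_grid_lines_py connect_grid_lines_py_alt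
  by_cases hd : dots = []
  · subst hd
    simp [PySem.List.sorted2, pvBLoop]
  · rw [if_neg hd, pvBLoop_eq_strokes]
    cases hs : PySem.List.sorted2 dots (fun p => p.2) (fun p => p.1) false with
    | nil =>
        exfalso
        apply hd
        have hp := PySem.List.sorted2_perm (xs := dots) (k1 := fun p => p.2) (k2 := fun p => p.1)
        have hp2 := hp false
        rw [hs] at hp2
        exact hp2.symm.eq_nil
    | cons x rest =>
        dsimp only
        have h2 := pvALoop_grp rest [] [] x
        simp only [List.nil_append] at h2
        rw [h2]
        obtain ⟨g, gs, hg⟩ := pvGrp_cons x rest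
        rw [hg]
        simp [pvStrokes]
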